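-- pv_equiv track=rewrite | github.com/clevyoung/algorithm-study | programmers/level1/신고 결과 받기/jihyung.py | solution
-- ===== SOURCE A (Python) =====
-- def solution(attack_ids, reports, k):
--     reports = list(set(reports))
--     reports_map = {}
--     deffenses_map = {}
--     for report in reports:
--         attack, deffense = report.split()
--         if attack not in reports_map:
--             reports_map[attack] = []
--         reports_map[attack].append(deffense)
--
--         if deffense not in deffenses_map:
--             deffenses_map[deffense] = 0
--         deffenses_map[deffense] += 1
--
--     answers = []
--     for attack_id in attack_ids:
--         if attack_id not in reports_map:
--             answers.append(0)
--             continue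
--
--         my_attack_success_count = 0
--         for target_id in reports_map[attack_id]:
--             if deffenses_map[target_id] >= k:
--                 my_attack_success_count += 1
--         answers.append(my_attack_success_count)
--
--     return answers
-- ===== SOURCE B (Python) =====
-- def solution(attack_ids, reports, k):
--     # Dedupe raw report strings, parse once, then distribute credit per report
--     # instead of scanning each attacker's report list.
--     pairs = [tuple(r.split()) for r in set(reports)]
--     defender_count = {}
--     for _, d in pairs:
--         defender_count[d] = defender_count.get(d, 0) + 1
--     credit = {}
--     for a, d in pairs:
--         if defender_count[d] >= k:
--             credit[a] = credit.get(a, 0) + 1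
--     return [credit.get(aid, 0) for aid in attack_ids]
-- ===== Notes on version B (the rewrite author's own statement) =====
-- stated objective: alternative
-- what changed: B replaces A's per-attacker grouping map and nested per-attacker scan by one pass over the deduped reports that distributes a credit of 1 to the attacker of each report whose defender reached the threshold, then answers by dictionary lookup per attack_id.
import Mathlib
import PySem

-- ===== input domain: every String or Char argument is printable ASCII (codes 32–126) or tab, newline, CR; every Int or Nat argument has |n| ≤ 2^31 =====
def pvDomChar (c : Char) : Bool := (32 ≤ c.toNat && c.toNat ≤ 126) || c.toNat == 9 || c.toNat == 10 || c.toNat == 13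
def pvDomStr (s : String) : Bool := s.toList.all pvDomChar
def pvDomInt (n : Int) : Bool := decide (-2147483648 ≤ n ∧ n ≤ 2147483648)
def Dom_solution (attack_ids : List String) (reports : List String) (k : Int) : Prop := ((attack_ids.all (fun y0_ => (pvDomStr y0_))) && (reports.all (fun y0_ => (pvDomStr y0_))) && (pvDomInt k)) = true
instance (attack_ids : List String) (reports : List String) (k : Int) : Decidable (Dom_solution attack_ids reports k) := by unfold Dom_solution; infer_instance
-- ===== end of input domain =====

-- B distributes credit per deduped report in one pass and answers by lookup, instead of A's
-- per-attacker grouping map with a nested scan; an alternative decomposition, same results.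


-- ===== PORT A =====
-- 'attack, deffense = report.split()' is ported as getD 0 / getD 1 on the split list:
-- exact under Pre_solution (each report splits into exactly two words; otherwise Python raises ValueError).
-- 'list(set(reports))' is PySem.Set.ofList; the answers depend only on per-key counts, not on set order.
def solution (attack_ids : List String) (reports : List String) (k : Int) : List Int :=
  let reports' := PySem.Set.ofList reports
  let maps :=
    reports'.foldl (fun st report =>
      ((st.1.setdefault ((PySem.Str.split₀ report).getD 0 "") []).modify
         ((PySem.Str.split₀ report).getD 0 "") []
         (fun l => l ++ [(PySem.Str.split₀ report).getD 1 ""]),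
       (st.2.setdefault ((PySem.Str.split₀ report).getD 1 "") 0).modify
         ((PySem.Str.split₀ report).getD 1 "") 0 (fun c => c + 1)))
      (PySem.Dict.empty, PySem.Dict.empty)
  let reports_map := maps.1
  let deffenses_map := maps.2
  attack_ids.foldl (fun answers attack_id =>
    if reports_map.contains attack_id = false then answers ++ [0]
    else
      answers ++ [(reports_map.getD attack_id []).foldl
        (fun cnt target_id => if deffenses_map.getD target_id 0 ≥ k then cnt + 1 else cnt) 0]) []

-- ===== PORT B =====
-- 'tuple(r.split())' for r in set(reports): exact under Pre_solution (two words per report).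
def solution_alt (attack_ids : List String) (reports : List String) (k : Int) : List Int :=
  let pairs := (PySem.Set.ofList reports).map
    (fun r => ((PySem.Str.split₀ r).getD 0 "", (PySem.Str.split₀ r).getD 1 ""))
  let defender_count := pairs.foldl
    (fun d p => d.insert p.2 (d.getD p.2 0 + 1)) PySem.Dict.empty
  let credit := pairs.foldl
    (fun d p => if defender_count.getD p.2 0 ≥ k then d.insert p.1 (d.getD p.1 0 + 1) else d)
    PySem.Dict.empty
  attack_ids.map (fun aid => credit.getD aid 0)

-- ===== PRECONDITION & SPEC =====
-- Pre_ excludes reports that do not split into exactly two whitespace-separated words: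
-- on those both Pythons raise ValueError while unpacking the split.
def Pre_solution (attack_ids : List String) (reports : List String) (k : Int) : Prop :=
  ∀ r ∈ reports, (PySem.Str.split₀ r).length = 2
instance (attack_ids : List String) (reports : List String) (k : Int) : Decidable (Pre_solution attack_ids reports k) := by unfold Pre_solution; infer_instance

def pvWitness_solution : List String × List String × Int := (["muzi", "frodo"], ["muzi frodo", "apeach frodo"], 1)

def Spec_solution (attack_ids : List String) (reports : List String) (k : Int) (out : List Int) : Prop := out = solution_alt attack_ids reports k
instance (attack_ids : List String) (reports : List String) (k : Int) (out : List Int) : Decidable (Spec_solution attack_ids reports k out) := by unfold Spec_solution; infer_instance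

-- ===== CLAIM (what is proved, stated in full; the proofs are below) =====
def Claim_equal_solution : Prop := ∀ (attack_ids : List String) (reports : List String) (k : Int), Dom_solution attack_ids reports k → Pre_solution attack_ids reports k → Spec_solution attack_ids reports k (solution attack_ids reports k)

-- ===== LEMMAS AND PROOFS =====

-- setdefault-then-modify with the same default is modify (A's 'if absent: init; then update' idiom)
theorem pv_setdefault_modify {ν : Type} (d : PySem.Dict String ν) (x : String) (v : ν) (f : ν → ν) :
    (d.setdefault x v).modify x v f = d.modify x v f := by
  by_cases h : d.contains x = true
  · rw [PySem.Dict.setdefault_of_contains _ _ h]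
  · have h' : d.contains x = false := by simpa using h
    rw [PySem.Dict.setdefault_of_not_contains _ _ h']
    simp [PySem.Dict.modify, PySem.Dict.insert_insert_self, PySem.Dict.getD_insert_self,
      PySem.Dict.getD_of_not_contains _ _ h']

-- A's inner counting loop, Prop-condition form of PySem.List.foldl_count_if
theorem pv_count_if (cond : String → Prop) [DecidablePred cond] (l : List String) (a : Int) :
    l.foldl (fun c t => if cond t then c + 1 else c) a
      = a + (l.countP (fun t => decide (cond t)) : Int) := by
  have h := PySem.List.foldl_count_if (fun t => decide (cond t)) l a
  simpa using h

-- B's credit dictionary counts, per attacker, the deduped reports whose condition holds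
theorem pv_creditD (cond : String × String → Prop) [DecidablePred cond] (l : List (String × String))
    (d : PySem.Dict String Int) (a : String) :
    (l.foldl (fun d p => if cond p then d.insert p.1 (d.getD p.1 0 + 1) else d) d).getD a 0
      = d.getD a 0 + (l.countP (fun p => decide (cond p) && (p.1 == a)) : Int) := by
  induction l generalizing d with
  | nil => simp
  | cons p l ih =>
    simp only [List.foldl_cons, List.countP_cons]
    by_cases hc : cond p
    · rw [if_pos hc, ih]
      by_cases ha : p.1 = a
      · simp only [hc, ha, decide_true, beq_self_eq_true, Bool.and_self, if_pos,
          PySem.Dict.getD_insert_self]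
        push_cast; ring
      · have hba : (p.1 == a) = false := by simpa using ha
        simp only [hc, decide_true, hba, Bool.and_false, if_neg, Bool.false_eq_true,
          not_false_iff, Nat.add_zero]
        rw [PySem.Dict.getD_insert]
        rw [if_neg (fun h => ha h.symm)]
    · rw [if_neg hc, ih]
      have : decide (cond p) = false := by simpa using hc
      simp [this]


-- A's answer loop as a map (pull the append out of the if)
theorem pv_foldl_ite_append {alpha : Type} (c : alpha → Bool) (f : alpha → Int) (l : List alpha) :
    l.foldl (fun ans x => if c x = false then ans ++ [0] else ans ++ [f x]) []
      = l.map (fun x => if c x = false then 0 else f x) := by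
  have h : (fun (ans : List Int) x => if c x = false then ans ++ [0] else ans ++ [f x])
      = fun ans x => ans ++ [if c x = false then 0 else f x] := by
    funext ans x; split <;> rfl
  rw [h, PySem.List.foldl_append_singleton_eq_map, List.nil_append]

-- the whole equivalence, abstracted over the two split projections
theorem pv_main (rs ids : List String) (k : Int) (aF dF : String → String) :
    List.foldl (fun (answers : List Int) attack_id =>
      if (List.foldl (fun (st : PySem.Dict String (List String) × PySem.Dict String Int) r =>
            ((st.1.setdefault (aF r) []).modify (aF r) [] fun l => l ++ [dF r],
             (st.2.setdefault (dF r) 0).modify (dF r) 0 fun c => c + 1))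
          (PySem.Dict.empty, PySem.Dict.empty) rs).1.contains attack_id = false
      then answers ++ [0]
      else answers ++ [List.foldl (fun (cnt : Int) t =>
          if (List.foldl (fun (st : PySem.Dict String (List String) × PySem.Dict String Int) r =>
                ((st.1.setdefault (aF r) []).modify (aF r) [] fun l => l ++ [dF r],
                 (st.2.setdefault (dF r) 0).modify (dF r) 0 fun c => c + 1))
              (PySem.Dict.empty, PySem.Dict.empty) rs).2.getD t 0 ≥ k then cnt + 1 else cnt) 0
          ((List.foldl (fun (st : PySem.Dict String (List String) × PySem.Dict String Int) r =>
                ((st.1.setdefault (aF r) []).modify (aF r) [] fun l => l ++ [dF r],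
                 (st.2.setdefault (dF r) 0).modify (dF r) 0 fun c => c + 1))
              (PySem.Dict.empty, PySem.Dict.empty) rs).1.getD attack_id [])]) [] ids
    = List.map (fun aid =>
        (List.foldl (fun d p =>
            if (List.foldl (fun d p => d.insert p.2 (d.getD p.2 0 + 1)) PySem.Dict.empty
                  (rs.map (fun r => (aF r, dF r)))).getD p.2 0 ≥ k
            then d.insert p.1 (d.getD p.1 0 + 1) else d)
          PySem.Dict.empty (rs.map (fun r => (aF r, dF r)))).getD aid 0) ids := by
  have hsplit : (List.foldl (fun (st : PySem.Dict String (List String) × PySem.Dict String Int) r =>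
        ((st.1.setdefault (aF r) []).modify (aF r) [] fun l => l ++ [dF r],
         (st.2.setdefault (dF r) 0).modify (dF r) 0 fun c => c + 1))
      (PySem.Dict.empty, PySem.Dict.empty) rs)
      = (List.foldl (fun d r => (d.setdefault (aF r) []).modify (aF r) [] fun l => l ++ [dF r])
           PySem.Dict.empty rs,
         List.foldl (fun d r => (d.setdefault (dF r) 0).modify (dF r) 0 fun c => c + 1)
           PySem.Dict.empty rs) :=
    PySem.List.foldl_prod_mk
      (fun (d : PySem.Dict String (List String)) r => (d.setdefault (aF r) []).modify (aF r) [] fun l => l ++ [dF r])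
      (fun (d : PySem.Dict String Int) r => (d.setdefault (dF r) 0).modify (dF r) 0 fun c => c + 1)
      rs PySem.Dict.empty PySem.Dict.empty
  rw [hsplit]
  simp only [pv_setdefault_modify]
  rw [pv_foldl_ite_append]
  refine List.map_congr_left fun aid _ => ?_
  have hrm : (List.foldl (fun d r => d.modify (aF r) [] fun l => l ++ [dF r])
        PySem.Dict.empty rs).getD aid []
      = ((rs.map (fun r => (aF r, dF r))).filter (fun p => p.1 == aid)).map (fun p => p.2) := by
    have h := PySem.Dict.getD_foldl_modify_append (rs.map (fun r => (aF r, dF r)))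
      PySem.Dict.empty aid
    rw [List.foldl_map] at h
    simpa using h
  have hdm : ∀ v, (List.foldl (fun d r => d.modify (dF r) 0 fun c => c + 1)
        PySem.Dict.empty rs).getD v 0 = ((rs.map dF).count v : Int) := by
    intro v
    have h := PySem.Dict.getD_foldl_modify_add_one (rs.map dF) PySem.Dict.empty v
    rw [List.foldl_map] at h
    simpa using h
  have hdc : ∀ v, (List.foldl (fun d p => d.insert p.2 (d.getD p.2 0 + 1)) PySem.Dict.empty
        (rs.map (fun r => (aF r, dF r)))).getD v 0 = ((rs.map dF).count v : Int) := by
    intro v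
    have h := PySem.Dict.getD_foldl_insert_add_one ((rs.map (fun r => (aF r, dF r))).map (fun p => p.2))
      PySem.Dict.empty v
    rw [List.foldl_map] at h
    simpa [List.map_map, Function.comp] using h
  simp only [hrm, hdm, hdc]
  rw [pv_count_if (fun t => ((rs.map dF).count t : Int) ≥ k)]
  rw [pv_creditD (fun p => (((rs.map dF).count p.2 : Int)) ≥ k)]
  simp only [List.countP_map, List.countP_filter, PySem.Dict.getD_empty, zero_add]
  have hkeys : (List.foldl (fun d r => d.modify (aF r) [] fun l => l ++ [dF r])
        PySem.Dict.empty rs).keys = PySem.Set.ofList (rs.map aF) := by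
    have h := PySem.Dict.keys_foldl_modify_key rs aF [] (fun _ r l => l ++ [dF r]) PySem.Dict.empty
    simpa [PySem.Dict.keys_empty, PySem.Set.update, PySem.Set.ofList] using h
  by_cases hcon : (List.foldl (fun d r => d.modify (aF r) [] fun l => l ++ [dF r])
      PySem.Dict.empty rs).contains aid = false
  · rw [if_pos hcon]
    have hnot : aid ∉ rs.map aF := by
      intro hmem
      have : (List.foldl (fun d r => d.modify (aF r) [] fun l => l ++ [dF r])
          PySem.Dict.empty rs).contains aid = true := by
        rw [PySem.Dict.contains_iff_mem_keys, hkeys, PySem.Set.mem_ofList]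
        exact hmem
      rw [this] at hcon; exact Bool.noConfusion hcon
    symm
    rw [Nat.cast_eq_zero]
    refine List.countP_eq_zero.mpr fun r hr => ?_
    simp only [Function.comp_apply, Bool.and_eq_true, beq_iff_eq, not_and]
    intro _ h2
    exact hnot (List.mem_map.mpr ⟨r, hr, h2⟩)
  · rw [if_neg hcon]
    simp [Bool.and_comm]

-- ===== VERDICT (by name: the statement is the Claim_ definition above) =====
theorem solution_spec : Claim_equal_solution := by
  intro ids reports k _ _
  unfold Spec_solution solution solution_alt
  simp only []
  exact pv_main (PySem.Set.ofList reports) ids k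
    (fun r => (PySem.Str.split₀ r).getD 0 "") (fun r => (PySem.Str.split₀ r).getD 1 "")
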